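-- pv_equiv track=rewrite | github.com/Merced3/StratForge | tools/audit_candles.py | _chain_breaks
-- ===== SOURCE A (Python) =====
-- def _chain_breaks(day_edges: dict[str, tuple[int, int]]) -> list[str]:
--     """
--     Given {day: (first_gx, last_gx)} sorted by day, return days where the
--     first_gx does not equal the expected next global_x from the previous file.
--     """
--     breaks = []
--     expected = None
--     for day in sorted(day_edges.keys()):
--         first, last = day_edges[day]
--         if first is None or last is None:
--             expected = None  # skip empty/invalid; reset expectation
--             continue
--         if expected is not None and first != expected:
--             breaks.append(day)
--         expected = last + 1
--     return breaks
-- ===== SOURCE B (Python) =====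
-- def _chain_breaks(day_edges: dict[str, tuple[int, int]]) -> list[str]:
--     """Predecessor-scan re-implementation: for each day, find its immediate
--     predecessor day by a linear max-scan over all keys (no sorting of the
--     input); flag the day if its first gx does not continue the predecessor's
--     last gx; sort the flagged days at the end."""
--     breaks = []
--     for day, (first, last) in day_edges.items():
--         if first is None or last is None:
--             continue
--         prev = None
--         for other in day_edges:
--             if other < day and (prev is None or other > prev):
--                 prev = other
--         if prev is None:
--             continue
--         pf, pl = day_edges[prev]
--         if pf is None or pl is None:
--             continue
--         if first != pl + 1:
--             breaks.append(day)
--     return sorted(breaks)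
-- ===== Notes on version B (the rewrite author's own statement) =====
-- stated objective: alternative
-- what changed: Replaces the sort-then-stateful-scan with an independent per-day predecessor search (linear max-scan over all keys, no sorting of the input) plus a final sort of only the flagged days.
import Mathlib
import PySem

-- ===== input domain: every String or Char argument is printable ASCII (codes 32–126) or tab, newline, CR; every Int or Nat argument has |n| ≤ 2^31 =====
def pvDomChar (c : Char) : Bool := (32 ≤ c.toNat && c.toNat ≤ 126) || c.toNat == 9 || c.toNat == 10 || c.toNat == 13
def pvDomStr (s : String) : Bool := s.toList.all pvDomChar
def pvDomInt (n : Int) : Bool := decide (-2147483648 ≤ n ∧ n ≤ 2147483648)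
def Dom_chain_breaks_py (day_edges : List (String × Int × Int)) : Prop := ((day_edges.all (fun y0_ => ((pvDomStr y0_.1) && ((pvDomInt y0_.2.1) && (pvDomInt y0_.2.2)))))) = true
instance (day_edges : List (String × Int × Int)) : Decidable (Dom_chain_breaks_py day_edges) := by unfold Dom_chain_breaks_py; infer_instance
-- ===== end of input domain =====

-- ===== PORT A =====
-- B replaces A's sort + stateful `expected` scan by an independent per-day
-- predecessor max-scan over all keys, sorting only the flagged days at the end
-- (objective: alternative algorithm; not claimed faster).
-- Port of A. The Lean input type carries Int edge values, so Python's
-- `first is None or last is None` branch can never fire and is omitted.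
def chain_breaks_py (day_edges : List (String × Int × Int)) : List String :=
  let d := PySem.Dict.ofList day_edges
  ((PySem.List.sorted d.keys (fun x => x) false).foldl
    (fun (acc : List String × Option Int) day =>
      -- day ∈ d.keys, so d[day] exists; the getD default is never used
      let fl := d.getD day (0, 0)
      let breaks :=
        if (match acc.2 with | some e => fl.1 != e | none => false) then
          acc.1 ++ [day]
        else acc.1
      (breaks, some (fl.2 + 1)))
    ([], none)).1

-- ===== PORT B =====
-- Port of B; the same None branches are omitted for the same reason.
-- inner loop `for other in day_edges: if other < day and (prev is None or other > prev)`
def chain_breaks_py_mb_step (day : String) (prev : Option String) (other : String) :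
    Option String :=
  if (decide (other < day) &&
        (match prev with | none => true | some p => decide (p < other))) = true
  then some other else prev

def chain_breaks_py_mb (keys : List String) (day : String) : Option String :=
  keys.foldl (chain_breaks_py_mb_step day) none

def chain_breaks_py_alt (day_edges : List (String × Int × Int)) : List String :=
  let d := PySem.Dict.ofList day_edges
  let breaks := d.items.foldl
    (fun (acc : List String) it =>
      match chain_breaks_py_mb d.keys it.1 with
      | none => acc
      | some p =>
        if it.2.1 ≠ (d.getD p (0, 0)).2 + 1 then acc ++ [it.1] else acc)
    []
  PySem.List.sorted breaks (fun x => x) false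

-- ===== PRECONDITION & SPEC =====
def Spec_chain_breaks_py (day_edges : List (String × Int × Int)) (out : List String) : Prop := out = chain_breaks_py_alt day_edges
instance (day_edges : List (String × Int × Int)) (out : List String) : Decidable (Spec_chain_breaks_py day_edges out) := by unfold Spec_chain_breaks_py; infer_instance

-- ===== CLAIM (what is proved, stated in full; the proofs are below) =====
def Claim_equal_chain_breaks_py : Prop := ∀ (day_edges : List (String × Int × Int)), Dom_chain_breaks_py day_edges → Spec_chain_breaks_py day_edges (chain_breaks_py day_edges)

-- ===== LEMMAS AND PROOFS =====

-- the common intermediate: walk the sorted day list remembering the previous day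
def pvD (d : PySem.Dict String (Int × Int)) : Option String → List String → List String
  | _, [] => []
  | prev, x :: t =>
    (match prev with
     | none => []
     | some p => if (d.getD x (0, 0)).1 ≠ (d.getD p (0, 0)).2 + 1 then [x] else []) ++
    pvD d (some x) t

theorem pvD_nil (d : PySem.Dict String (Int × Int)) (prev : Option String) :
    pvD d prev [] = [] := by cases prev <;> rfl

theorem pvD_sublist (d : PySem.Dict String (Int × Int)) (t : List String) :
    ∀ prev, (pvD d prev t).Sublist t := by
  induction t with
  | nil => intro prev; simp [pvD_nil]
  | cons x t ih =>
    intro prev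
    cases prev with
    | none => simpa [pvD] using (ih (some x)).cons x
    | some p =>
      simp only [pvD]
      by_cases h : (d.getD x (0, 0)).1 ≠ (d.getD p (0, 0)).2 + 1
      · simpa [h] using (ih (some x)).cons₂ x
      · simpa [h] using (ih (some x)).cons x

-- A's fold equals pvD
theorem pvA_fold (d : PySem.Dict String (Int × Int)) (t : List String) :
    ∀ (bs : List String) (p : String),
      ((t.foldl
        (fun (acc : List String × Option Int) day =>
          let fl := d.getD day (0, 0)
          ((if (match acc.2 with | some e => fl.1 != e | none => false) then
              acc.1 ++ [day]
            else acc.1), some (fl.2 + 1)))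
        (bs, some ((d.getD p (0, 0)).2 + 1))).1) = bs ++ pvD d (some p) t := by
  induction t with
  | nil => intro bs p; simp [pvD_nil]
  | cons x t ih =>
    intro bs p
    simp only [List.foldl_cons, pvD]
    by_cases h : (d.getD x (0, 0)).1 ≠ (d.getD p (0, 0)).2 + 1
    · simpa [h] using ih (bs ++ [x]) x
    · simpa [h] using ih bs x

theorem pvA_eq_pvD (d : PySem.Dict String (Int × Int)) (s : List String) :
    ((s.foldl
        (fun (acc : List String × Option Int) day =>
          let fl := d.getD day (0, 0)
          ((if (match acc.2 with | some e => fl.1 != e | none => false) then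
              acc.1 ++ [day]
            else acc.1), some (fl.2 + 1)))
        ([], none)).1) = pvD d none s := by
  cases s with
  | nil => simp [pvD_nil]
  | cons x t =>
    simp only [List.foldl_cons, pvD]
    simpa using pvA_fold d t [] x

-- characterization of the max-below scan: depends only on membership
def pvMBChar (day : String) (l : List String) : Option String → Prop
  | none => ∀ x ∈ l, ¬ x < day
  | some m => m ∈ l ∧ m < day ∧ ∀ x ∈ l, x < day → x ≤ m

theorem pvMBstep_skip (day other : String) (acc : Option String) (h : ¬ other < day) :
    chain_breaks_py_mb_step day acc other = acc := by
  cases acc <;> simp [chain_breaks_py_mb_step, h]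

theorem pvMBstep_none (day other : String) (h : other < day) :
    chain_breaks_py_mb_step day none other = some other := by
  simp [chain_breaks_py_mb_step, h]

theorem pvMBstep_up (day other p : String) (h : other < day) (h2 : p < other) :
    chain_breaks_py_mb_step day (some p) other = some other := by
  simp [chain_breaks_py_mb_step, h, h2]

theorem pvMBstep_keep (day other p : String) (h2 : ¬ p < other) :
    chain_breaks_py_mb_step day (some p) other = some p := by
  simp [chain_breaks_py_mb_step, h2]

theorem pvMB_char_aux (day : String) (l : List String) :
    ∀ (acc : Option String), (∀ p, acc = some p → p < day) →
      (match l.foldl (chain_breaks_py_mb_step day) acc with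
       | none => acc = none ∧ ∀ x ∈ l, ¬ x < day
       | some m => (m ∈ l ∧ m < day ∨ acc = some m) ∧
           (∀ x ∈ l, x < day → x ≤ m) ∧ (∀ p, acc = some p → p ≤ m)) := by
  induction l with
  | nil =>
    intro acc hacc
    cases acc with
    | none => simp
    | some p => simp
  | cons x t ih =>
    intro acc hacc
    rw [List.foldl_cons]
    by_cases hx : x < day
    · have hstep : chain_breaks_py_mb_step day acc x = some x ∨
          (∃ p, acc = some p ∧ ¬ p < x ∧ chain_breaks_py_mb_step day acc x = some p) := by
        cases acc with
        | none => exact Or.inl (pvMBstep_none day x hx)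
        | some p =>
          by_cases hpx : p < x
          · exact Or.inl (pvMBstep_up day x p hx hpx)
          · exact Or.inr ⟨p, rfl, hpx, pvMBstep_keep day x p hpx⟩
      rcases hstep with hstep | ⟨p, hap, hpx, hstep⟩
      · rw [hstep]
        have := ih (some x) (by intro q hq; cases hq; exact hx)
        rcases hmb : t.foldl (chain_breaks_py_mb_step day) (some x) with _ | m
        · rw [hmb] at this; exact absurd this.1 (by simp)
        · rw [hmb] at this
          have hxm : x ≤ m := this.2.2 x rfl
          refine ⟨?_, ?_, ?_⟩
          · rcases this.1 with h | h
            · exact Or.inl ⟨List.mem_cons_of_mem _ h.1, h.2⟩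
            · have : m = x := by injection h.symm
              exact Or.inl ⟨by simp [this], by simpa [this] using hx⟩
          · intro y hy hylt
            rcases List.mem_cons.1 hy with rfl | hy
            · exact hxm
            · exact this.2.1 y hy hylt
          · intro q hq
            have hq' : q < day := hacc q hq
            have : chain_breaks_py_mb_step day acc x = some x := hstep
            cases acc with
            | none => exact absurd hq (by simp)
            | some r =>
              have hr : r = q := by injection hq
              subst hr
              by_cases hrx : r < x
              · exact le_trans (le_of_lt hrx) hxm
              · rw [pvMBstep_keep day x r hrx] at hstep
                have : r = x := by injection hstep
                exact this ▸ hxm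
      · rw [hstep]
        have := ih (some p) (by intro q hq; cases hq; exact hacc p hap)
        rcases hmb : t.foldl (chain_breaks_py_mb_step day) (some p) with _ | m
        · rw [hmb] at this; exact absurd this.1 (by simp)
        · rw [hmb] at this
          have hpm : p ≤ m := this.2.2 p rfl
          refine ⟨?_, ?_, ?_⟩
          · rcases this.1 with h | h
            · exact Or.inl ⟨List.mem_cons_of_mem _ h.1, h.2⟩
            · exact Or.inr (hap.trans h)
          · intro y hy hylt
            rcases List.mem_cons.1 hy with rfl | hy
            · exact le_trans (le_of_not_gt hpx) hpm
            · exact this.2.1 y hy hylt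
          · intro q hq
            have : q = p := by rw [hap] at hq; injection hq.symm
            exact this ▸ hpm
    · rw [pvMBstep_skip day x acc hx]
      have := ih acc hacc
      rcases hmb : t.foldl (chain_breaks_py_mb_step day) acc with _ | m
      · rw [hmb] at this
        refine ⟨this.1, ?_⟩
        intro y hy
        rcases List.mem_cons.1 hy with rfl | hy
        · exact hx
        · exact this.2 y hy
      · rw [hmb] at this
        refine ⟨?_, ?_, this.2.2⟩
        · rcases this.1 with h | h
          · exact Or.inl ⟨List.mem_cons_of_mem _ h.1, h.2⟩
          · exact Or.inr h
        · intro y hy hylt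
          rcases List.mem_cons.1 hy with rfl | hy
          · exact absurd hylt hx
          · exact this.2.1 y hy hylt

theorem pvMB_char (day : String) (l : List String) :
    pvMBChar day l (chain_breaks_py_mb l day) := by
  have := pvMB_char_aux day l none (by simp)
  unfold chain_breaks_py_mb
  rcases hmb : l.foldl (chain_breaks_py_mb_step day) none with _ | m
  · rw [hmb] at this; exact this.2
  · rw [hmb] at this
    rcases this.1 with h | h
    · exact ⟨h.1, h.2, this.2.1⟩
    · exact absurd h (by simp)

theorem pvMB_unique (day : String) (l l' : List String) (r r' : Option String)
    (h : pvMBChar day l r) (h' : pvMBChar day l' r')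
    (hmem : ∀ x, x ∈ l ↔ x ∈ l') : r = r' := by
  cases r with
  | none =>
    cases r' with
    | none => rfl
    | some m => exact absurd h'.2.1 (h m ((hmem m).2 h'.1))
  | some m =>
    cases r' with
    | none => exact absurd h.2.1 (h' m ((hmem m).1 h.1))
    | some m' =>
      have h1 : m ≤ m' := h'.2.2 m ((hmem m).1 h.1) h.2.1
      have h2 : m' ≤ m := h.2.2 m' ((hmem m').2 h'.1) h'.2.1
      exact congrArg some (le_antisymm h1 h2)

-- B's inner scan over a permutation of the sorted keys gives the same result
theorem pvMB_perm (day : String) (l l' : List String)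
    (hmem : ∀ x, x ∈ l ↔ x ∈ l') :
    chain_breaks_py_mb l day = chain_breaks_py_mb l' day :=
  pvMB_unique day l l' _ _ (pvMB_char day l) (pvMB_char day l') hmem

-- B's outer foldl is a filterMap
def pvG (d : PySem.Dict String (Int × Int)) (F : List String)
    (it : String × Int × Int) : Option String :=
  match chain_breaks_py_mb F it.1 with
  | none => none
  | some p => if it.2.1 ≠ (d.getD p (0, 0)).2 + 1 then some it.1 else none

theorem pvB_fold (d : PySem.Dict String (Int × Int)) (F : List String)
    (l : List (String × Int × Int)) :
    ∀ acc,
      l.foldl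
        (fun (acc : List String) it =>
          match chain_breaks_py_mb F it.1 with
          | none => acc
          | some p =>
            if it.2.1 ≠ (d.getD p (0, 0)).2 + 1 then acc ++ [it.1] else acc)
        acc = acc ++ l.filterMap (pvG d F) := by
  induction l with
  | nil => intro acc; simp
  | cons x t ih =>
    intro acc
    simp only [List.foldl_cons, List.filterMap_cons, pvG]
    rcases chain_breaks_py_mb F x.1 with _ | p
    · exact ih acc
    · dsimp only
      by_cases h : x.2.1 ≠ (d.getD p (0, 0)).2 + 1
      · rw [if_pos h, if_pos h, ih (acc ++ [x.1]), List.append_assoc]; rfl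
      · rw [if_neg h, if_neg h]; exact ih acc

-- on a strictly sorted F, the filterMap along F is exactly pvD
theorem pvFilterMap_eq_pvD (d : PySem.Dict String (Int × Int)) (F : List String)
    (hF : F.Pairwise (· < ·)) :
    ∀ (s u : List String), F = u ++ s →
      (s.map (fun day => (day, d.getD day (0, 0)))).filterMap (pvG d F) =
        pvD d u.getLast? s := by
  intro s
  induction s with
  | nil => intro u _; simp [pvD_nil]
  | cons x t ih =>
    intro u hu
    have hmbx : chain_breaks_py_mb F x = u.getLast? := by
      rcases List.eq_nil_or_concat u with rfl | ⟨u', m, rfl⟩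
      · -- x is the minimum: no key below it
        refine pvMB_unique x F F _ _ (pvMB_char x F) ?_ (fun _ => Iff.rfl)
        subst hu
        show ∀ y ∈ x :: t, ¬ y < x
        intro y hy
        rcases List.mem_cons.1 hy with rfl | hy
        · exact lt_irrefl y
        · exact fun hlt => absurd (List.rel_of_pairwise_cons hF hy) (asymm hlt)
      · -- the last of u is the immediate predecessor
        refine pvMB_unique x F F _ _ (pvMB_char x F) ?_ (fun _ => Iff.rfl)
        have hu' : F = u' ++ m :: x :: t := by simpa using hu
        subst hu'
        rw [List.concat_eq_append, List.getLast?_concat]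
        have hpa := List.pairwise_append.1 hF
        have hm := List.pairwise_cons.1 hpa.2.1
        refine ⟨by simp, hm.1 x (by simp), ?_⟩
        intro y hy hylt
        rcases List.mem_append.1 hy with hy | hy
        · exact le_of_lt (hpa.2.2 y hy m (by simp))
        · rcases List.mem_cons.1 hy with rfl | hy
          · exact le_refl y
          · rcases List.mem_cons.1 hy with rfl | hy
            · exact absurd hylt (lt_irrefl y)
            · exact absurd (List.rel_of_pairwise_cons (List.pairwise_cons.1 hpa.2.1).2 hy)
                (asymm hylt)
    have hrec := ih (u ++ [x]) (by simpa using hu)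
    rw [List.getLast?_concat] at hrec
    rw [List.map_cons, List.filterMap_cons]
    rcases hul : u.getLast? with _ | p <;> rw [hul] at hmbx
    · have hGx : pvG d F (x, d.getD x (0, 0)) = none := by simp [pvG, hmbx]
      rw [hGx]
      show (t.map (fun day => (day, d.getD day (0, 0)))).filterMap (pvG d F) =
        pvD d none (x :: t)
      rw [hrec]
      simp [pvD]
    · by_cases h : (d.getD x (0, 0)).1 ≠ (d.getD p (0, 0)).2 + 1
      · have hGx : pvG d F (x, d.getD x (0, 0)) = some x := by simp [pvG, hmbx, h]
        rw [hGx]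
        show x :: (t.map (fun day => (day, d.getD day (0, 0)))).filterMap (pvG d F) =
          pvD d (some p) (x :: t)
        rw [hrec]
        simp [pvD, h]
      · have hGx : pvG d F (x, d.getD x (0, 0)) = none := by simp [pvG, hmbx, h]
        rw [hGx]
        show (t.map (fun day => (day, d.getD day (0, 0)))).filterMap (pvG d F) =
          pvD d (some p) (x :: t)
        rw [hrec]
        simp [pvD, h]

-- ===== VERDICT (by name: the statement is the Claim_ definition above) =====
theorem chain_breaks_py_spec : Claim_equal_chain_breaks_py := by
  intro day_edges _
  show chain_breaks_py day_edges = chain_breaks_py_alt day_edges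
  have hnk : (PySem.Dict.ofList day_edges).keys.Nodup :=
    PySem.Dict.nodup_keys_ofList day_edges
  set d := PySem.Dict.ofList day_edges with hd
  set s := PySem.List.sorted d.keys (fun x => x) false with hs
  have hperm : s.Perm d.keys := PySem.List.sorted_perm d.keys (fun x => x) false
  have hsn : s.Nodup := hperm.nodup_iff.2 hnk
  have hslt : s.Pairwise (· < ·) := by
    have hle : s.Pairwise (· ≤ ·) := by
      simpa using PySem.List.sorted_pairwise d.keys (fun x => x)
    exact (hle.and hsn).imp (fun h => lt_of_le_of_ne h.1 h.2)
  have hA : chain_breaks_py day_edges = pvD d none s := pvA_eq_pvD d s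
  have hB : chain_breaks_py_alt day_edges =
      PySem.List.sorted (d.items.filterMap (pvG d d.keys)) (fun x => x) false := by
    have h := pvB_fold d d.keys d.items []
    rw [List.nil_append] at h
    exact congrArg (fun l => PySem.List.sorted l (fun x => x) false) h
  have hGcongr : d.items.filterMap (pvG d d.keys) = d.items.filterMap (pvG d s) := by
    apply List.filterMap_congr
    intro it _
    unfold pvG
    rw [pvMB_perm it.1 d.keys s
      (fun x => ⟨fun h => hperm.mem_iff.2 h, fun h => hperm.mem_iff.1 h⟩)]
  have hitems : (s.map (fun day => (day, d.getD day (0, 0)))).Perm d.items := by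
    have h1 : d.keys.map (fun day => (day, d.getD day (0, 0))) = d.items := by
      have hk : d.keys = d.items.map (fun p => p.1) := rfl
      rw [hk, List.map_map]
      conv_rhs => rw [← List.map_id d.items]
      apply List.map_congr_left
      intro p hp
      have hg := PySem.Dict.getD_of_mem_items (d := d) (k := p.1) (v := p.2)
        (by simpa using hp) hnk (d0 := (0, 0))
      simp [Function.comp, hg]
    have h2 := hperm.map (fun day => (day, d.getD day (0, 0)))
    rw [h1] at h2
    exact h2
  have hBfm : (d.items.filterMap (pvG d s)).Perm (pvD d none s) := by
    have := (hitems.filterMap (pvG d s)).symm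
    rwa [pvFilterMap_eq_pvD d s hslt s [] rfl] at this
  have hDlt : (pvD d none s).Pairwise (· < ·) := hslt.sublist (pvD_sublist d s none)
  rw [hA, hB, hGcongr]
  exact (PySem.List.sorted_eq_of_perm_of_pairwise_lt _ _ _ hBfm.symm hDlt).symm
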